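-- pv_equiv track=rewrite | github.com/kizniche/Mycodo | mycodo/tests/software_tests/test_sensors/test_all_sensors.py | conditions_list
-- ===== SOURCE A (Python) =====
-- def conditions_list(sensor_measurements, range_num):
--     list_cond = []
--     number = 20
--     number_mod = 5
--     for _ in range(range_num):
--         tuple_conditions = []
--         for _ in sensor_measurements:
--             tuple_conditions.append(number)
--             number += number_mod
--         if len(tuple_conditions) > 1:
--             tuple_conditions = tuple(tuple_conditions)
--         else:
--             tuple_conditions = tuple_conditions[0]
--         list_cond.append(tuple_conditions)
--     return list_cond
-- ===== SOURCE B (Python) =====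
-- def conditions_list(sensor_measurements, range_num):
--     n = len(sensor_measurements)
--     list_cond = []
--     for i in range(range_num):
--         row = [20 + 5 * (i * n + j) for j in range(n)]
--         list_cond.append(tuple(row) if n > 1 else row[0])
--     return list_cond
-- ===== Notes on version B (the rewrite author's own statement) =====
-- stated objective: simpler
-- what changed: Replaces the counter threaded across rows and elements with closed-form index arithmetic: row i, column j is 20 + 5*(i*n + j), so each row is built independently by a comprehension.
-- outside the precondition, e.g. on conditions_list(['x'], 2): A returns [20, 25], B returns [20, 25]
import Mathlib
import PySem

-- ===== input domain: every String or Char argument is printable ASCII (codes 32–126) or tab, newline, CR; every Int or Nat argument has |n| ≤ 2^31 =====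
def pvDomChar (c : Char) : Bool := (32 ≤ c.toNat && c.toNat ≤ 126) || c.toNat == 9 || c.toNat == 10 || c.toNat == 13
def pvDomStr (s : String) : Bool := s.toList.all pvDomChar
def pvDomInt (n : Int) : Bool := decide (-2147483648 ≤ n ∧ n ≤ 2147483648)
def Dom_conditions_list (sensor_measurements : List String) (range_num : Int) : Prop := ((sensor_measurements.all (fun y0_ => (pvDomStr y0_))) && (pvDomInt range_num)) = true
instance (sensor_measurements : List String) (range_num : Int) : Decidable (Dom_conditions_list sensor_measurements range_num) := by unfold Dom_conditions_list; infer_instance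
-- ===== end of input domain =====

-- B replaces A's counter threaded across rows and elements with closed-form index
-- arithmetic (row i, column j ↦ 20 + 5*(i*n + j)); objective: simpler.

-- ===== PORT A =====
-- literal transliteration of A: outer loop over range(range_num) threading
-- (list_cond, number); inner loop over sensor_measurements appending the counter.
-- tuple(row) and a bare int row[0] are both represented as List Int; where Python's
-- tuple_conditions[0] raises IndexError (empty measurement list) the port uses
-- .getD 0, and a bare-int row is represented as a one-element list — both cases
-- are excluded by Pre_conditions_list.
def conditions_list (sensor_measurements : List String) (range_num : Int) : List (List Int) :=
  ((PySem.List.pyRange 0 range_num 1).foldl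
    (fun (st : List (List Int) × Int) _ =>
      let inner := sensor_measurements.foldl
        (fun (p : List Int × Int) _ => (p.1 ++ [p.2], p.2 + 5)) (([] : List Int), st.2)
      let row := if inner.1.length > 1 then inner.1
                 else [(PySem.List.pyGet? inner.1 0).getD 0]
      (st.1 ++ [row], inner.2))
    (([] : List (List Int)), 20)).1

-- ===== PORT B =====
-- literal transliteration of B: n = len(...), then each row by closed-form arithmetic;
-- row[0] for n ≤ 1 ported with pyGet? (raises only on the empty list, outside Pre_).
def conditions_list_alt (sensor_measurements : List String) (range_num : Int) : List (List Int) :=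
  let n : Int := sensor_measurements.length
  (PySem.List.pyRange 0 range_num 1).map (fun i =>
    let row := (PySem.List.pyRange 0 n 1).map (fun j => 20 + 5 * (i * n + j))
    if n > 1 then row else [(PySem.List.pyGet? row 0).getD 0])

-- ===== PRECONDITION & SPEC =====
-- Pre_ excludes the inputs where Python A raises IndexError (empty measurement list
-- with range_num > 0) and the single-measurement inputs: there A returns rows that are
-- bare ints, not tuples, a value the declared return type List (List Int) cannot
-- represent — Python B returns exactly the same bare ints there (see cites), so the
-- exclusion reflects only the typed ports, not a behaviour B declines to match.
def Pre_conditions_list (sensor_measurements : List String) (range_num : Int) : Prop :=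
  sensor_measurements.length > 1 ∨ range_num ≤ 0
instance (sensor_measurements : List String) (range_num : Int) : Decidable (Pre_conditions_list sensor_measurements range_num) := by unfold Pre_conditions_list; infer_instance
def pvWitness_conditions_list : List String × Int := (["a", "b"], 3)

def Spec_conditions_list (sensor_measurements : List String) (range_num : Int) (out : List (List Int)) : Prop := out = conditions_list_alt sensor_measurements range_num
instance (sensor_measurements : List String) (range_num : Int) (out : List (List Int)) : Decidable (Spec_conditions_list sensor_measurements range_num out) := by unfold Spec_conditions_list; infer_instance

-- ===== CLAIM (what is proved, stated in full; the proofs are below) =====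
def Claim_equal_conditions_list : Prop := ∀ (sensor_measurements : List String) (range_num : Int), Dom_conditions_list sensor_measurements range_num → Pre_conditions_list sensor_measurements range_num → Spec_conditions_list sensor_measurements range_num (conditions_list sensor_measurements range_num)

-- ===== LEMMAS AND PROOFS =====

-- the row that starts at counter value c, as A's inner loop produces it
def pvRow (len : Nat) (c : Int) : List Int :=
  (List.range len).map (fun (j : Nat) => c + 5 * (j : Int))

def pvWrap (r : List Int) : List Int :=
  if r.length > 1 then r else [(PySem.List.pyGet? r 0).getD 0]

lemma pvRow_succ (n : Nat) (c : Int) : pvRow (n + 1) c = c :: pvRow n (c + 5) := by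
  simp only [pvRow, List.range_succ_eq_map, List.map_cons, List.map_map, Function.comp_def,
    List.cons.injEq]
  constructor
  · ring
  · refine List.map_congr_left (fun j _ => ?_); push_cast; ring

-- A's inner loop characterised
lemma pv_inner (sm : List String) : ∀ (acc : List Int) (c : Int),
    sm.foldl (fun (p : List Int × Int) _ => (p.1 ++ [p.2], p.2 + 5)) (acc, c)
      = (acc ++ pvRow sm.length c, c + 5 * sm.length) := by
  induction sm with
  | nil => intro acc c; simp [pvRow]
  | cons x xs ih =>
      intro acc c
      simp only [List.foldl_cons, ih, List.length_cons, pvRow_succ, Prod.mk.injEq]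
      constructor
      · simp
      · push_cast; ring

-- A's outer loop characterised (the fold ignores the list elements, only length matters)
lemma pv_outer (sm : List String) : ∀ (m : Nat) (acc : List (List Int)) (c : Int),
    (List.range m).foldl
      (fun (st : List (List Int) × Int) (_ : Nat) =>
        let inner := sm.foldl
          (fun (p : List Int × Int) _ => (p.1 ++ [p.2], p.2 + 5)) (([] : List Int), st.2)
        let row := if inner.1.length > 1 then inner.1
                   else [(PySem.List.pyGet? inner.1 0).getD 0]
        (st.1 ++ [row], inner.2)) (acc, c)
      = (acc ++ (List.range m).map
            (fun (k : Nat) => pvWrap (pvRow sm.length (c + 5 * (sm.length : Int) * (k : Int)))),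
         c + 5 * sm.length * m) := by
  intro m
  induction m with
  | zero => intro acc c; simp
  | succ m ih =>
      intro acc c
      rw [List.range_succ, List.foldl_append, ih]
      simp only [List.foldl_cons, List.foldl_nil, pv_inner, Prod.mk.injEq]
      constructor
      · simp [pvWrap, List.map_append, List.append_assoc]
      · push_cast; ring

-- ===== VERDICT (by name: the statement is the Claim_ definition above) =====
theorem conditions_list_spec : Claim_equal_conditions_list := by
  intro sm rn _ _
  unfold Spec_conditions_list conditions_list conditions_list_alt
  rw [PySem.List.pyRange_one]
  simp only [List.foldl_map, List.map_map, sub_zero]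
  rw [pv_outer sm rn.toNat [] 20]
  simp only [List.nil_append]
  refine List.map_congr_left (fun k _ => ?_)
  simp only [Function.comp_apply]
  have hlen : ((sm.length : Int) - 0).toNat = sm.length := by omega
  have hrow : (PySem.List.pyRange 0 (sm.length : Int) 1).map
      (fun j => 20 + 5 * (((0 : Int) + (k : Int)) * (sm.length : Int) + j))
      = pvRow sm.length (20 + 5 * (sm.length : Int) * (k : Int)) := by
    rw [PySem.List.pyRange_one, hlen, List.map_map]
    simp only [pvRow]
    refine List.map_congr_left (fun j _ => ?_)
    simp only [Function.comp_apply]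
    ring
  rw [hrow]
  by_cases h : sm.length > 1
  · have h' : (1 : Int) < (sm.length : Int) := by exact_mod_cast h
    simp [pvWrap, pvRow, h, h']
  · have h' : ¬ (1 : Int) < (sm.length : Int) := by exact_mod_cast h
    simp [pvWrap, pvRow, h, h']
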